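-- pv_equiv track=rewrite | github.com/RiccardoLucerna/VAJE-UVP | Stari izpiti/3-izpit-202324/01_pesnik_france.py | dolzine_kitic
-- ===== SOURCE A (Python) =====
-- def dolzine_kitic(pesem):
--     # Split the poem into stanzas (separated by empty lines)
--     stanzas = []
--     current_stanza = []
--
--     for line in pesem.split('\n'):
--         stripped_line = line.strip()
--         if stripped_line:  # If line is not empty
--             current_stanza.append(stripped_line)
--         elif current_stanza:  # If we hit an empty line and have a current stanza
--             stanzas.append(current_stanza)
--             current_stanza = []
--
--     # Add the last stanza if there's any
--     if current_stanza:
--         stanzas.append(current_stanza)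
--
--     # Return the lengths of each stanza
--     return [len(stanza) for stanza in stanzas]
-- ===== SOURCE B (Python) =====
-- def dolzine_kitic(pesem):
--     # indices of non-blank lines, then run-length-encode maximal runs of
--     # consecutive indices: each run is one stanza, its length the line count
--     idx = [i for i, ln in enumerate(pesem.split('\n')) if ln.strip()]
--     res = []
--     prev = None
--     for i in idx:
--         if prev == i - 1:
--             res[-1] += 1
--         else:
--             res.append(1)
--         prev = i
--     return res
-- ===== Notes on version B (the rewrite author's own statement) =====
-- stated objective: alternative
-- what changed: Instead of accumulating the current stanza's lines in a list and flushing it on blank lines and at the end, B first collects the indices of non-blank lines and then run-length-encodes maximal runs of consecutive indices, incrementing the last count in place; the stanza accumulator and the post-loop flush disappear.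
import Mathlib
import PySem

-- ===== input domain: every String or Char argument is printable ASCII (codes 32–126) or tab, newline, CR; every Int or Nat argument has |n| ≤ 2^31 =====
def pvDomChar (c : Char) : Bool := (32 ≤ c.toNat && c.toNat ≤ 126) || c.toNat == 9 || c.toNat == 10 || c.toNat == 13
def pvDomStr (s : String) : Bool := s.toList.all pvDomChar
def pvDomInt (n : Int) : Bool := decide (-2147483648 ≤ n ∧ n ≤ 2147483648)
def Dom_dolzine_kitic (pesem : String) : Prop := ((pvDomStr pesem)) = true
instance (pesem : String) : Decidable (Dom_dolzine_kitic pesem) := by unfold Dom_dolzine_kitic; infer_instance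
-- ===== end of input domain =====

-- B replaces A's stanza-accumulator state machine (collect lines, flush on blank and at end)
-- by a two-pass run-length encoding of the indices of non-blank lines; same cost, different structure.


-- ===== PORT A =====
-- one loop iteration of A: append stripped line to the current stanza, or flush it
def pvStepA (acc : List (List String) × List String) (line : String) :
    List (List String) × List String :=
  let stripped := PySem.Str.strip line
  if stripped ≠ "" then (acc.1, acc.2 ++ [stripped])
  else if acc.2 ≠ [] then (acc.1 ++ [acc.2], [])
  else acc

def dolzine_kitic (pesem : String) : List Int :=
  let st := ((PySem.Str.split? pesem "\n").getD []).foldl pvStepA ([], [])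
  let stanzas := if st.2 ≠ [] then st.1 ++ [st.2] else st.1
  stanzas.map (fun stanza => (stanza.length : Int))

-- ===== PORT B =====
-- res[-1] += 1  (B only reaches this with res non-empty)
def pvBump : List Int → List Int
  | [] => []
  | [x] => [x + 1]
  | x :: y :: xs => x :: pvBump (y :: xs)

-- the list comprehension: indices of the non-blank lines
def pvIdxB : List (Int × String) → List Int
  | [] => []
  | (i, ln) :: rest =>
      if PySem.Str.strip ln ≠ "" then i :: pvIdxB rest else pvIdxB rest

-- the for-loop over idx with its prev variable
def pvLoopB : List Int → List Int → Option Int → List Int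
  | [], res, _ => res
  | i :: is, res, prev =>
      if prev = some (i - 1) then pvLoopB is (pvBump res) (some i)
      else pvLoopB is (res ++ [1]) (some i)

def dolzine_kitic_alt (pesem : String) : List Int :=
  let idx := pvIdxB (PySem.List.enumerate ((PySem.Str.split? pesem "\n").getD []))
  pvLoopB idx [] none

-- ===== PRECONDITION & SPEC =====
def Spec_dolzine_kitic (pesem : String) (out : List Int) : Prop := out = dolzine_kitic_alt pesem
instance (pesem : String) (out : List Int) : Decidable (Spec_dolzine_kitic pesem out) := by unfold Spec_dolzine_kitic; infer_instance

-- ===== CLAIM (what is proved, stated in full; the proofs are below) =====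
def Claim_equal_dolzine_kitic : Prop := ∀ (pesem : String), Dom_dolzine_kitic pesem → Spec_dolzine_kitic pesem (dolzine_kitic pesem)

-- ===== LEMMAS AND PROOFS =====

-- reference function: run lengths of maximal blocks of non-blank lines, carrying the open run
def pvGo : List String → Int → List Int
  | [], r => if r ≠ 0 then [r] else []
  | l :: ls, r =>
      if PySem.Str.strip l ≠ "" then pvGo ls (r + 1)
      else if r ≠ 0 then r :: pvGo ls 0 else pvGo ls 0

theorem pvBump_append (res : List Int) (c : Int) : pvBump (res ++ [c]) = res ++ [c + 1] := by
  induction res with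
  | nil => simp [pvBump]
  | cons a t ih => cases t with
    | nil => simp [pvBump]
    | cons b u => simpa [pvBump] using ih

set_option maxHeartbeats 1000000 in
theorem pvA_inv (ls : List String) :
    ∀ (st : List (List String)) (cur : List String),
      (if (ls.foldl pvStepA (st, cur)).2 ≠ [] then
          (ls.foldl pvStepA (st, cur)).1 ++ [(ls.foldl pvStepA (st, cur)).2]
        else (ls.foldl pvStepA (st, cur)).1).map (fun s => (s.length : Int))
      = st.map (fun s => (s.length : Int)) ++ pvGo ls (cur.length : Int) := by
  induction ls with
  | nil =>
      intro st cur
      by_cases h : cur = [] <;>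
        simp [pvGo, h, Int.natCast_eq_zero, List.length_eq_zero_iff]
  | cons l ls ih =>
      intro st cur
      by_cases h : PySem.Str.strip l ≠ ""
      · simp only [List.foldl_cons]
        rw [show pvStepA (st, cur) l = (st, cur ++ [PySem.Str.strip l]) from by
          simp [pvStepA, h]]
        rw [ih st (cur ++ [PySem.Str.strip l])]
        have hlen : (((cur ++ [PySem.Str.strip l]).length : Int)) = (cur.length : Int) + 1 := by
          simp
        rw [hlen]
        simp [pvGo, h]
      · have he : PySem.Str.strip l = "" := not_not.mp h
        by_cases hc : cur = []
        · simp only [List.foldl_cons]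
          rw [show pvStepA (st, cur) l = (st, cur) from by simp [pvStepA, he, hc]]
          rw [ih st cur]
          simp [pvGo, he, hc]
        · simp only [List.foldl_cons]
          rw [show pvStepA (st, cur) l = (st ++ [cur], []) from by simp [pvStepA, he, hc]]
          rw [ih (st ++ [cur]) []]
          simp [pvGo, he, hc]

set_option maxHeartbeats 1000000 in
theorem pvB_inv (ls : List String) :
    (∀ (k : Int) (res : List Int) (c : Int), 1 ≤ c →
      pvLoopB (pvIdxB (PySem.List.enumerate ls (k + 1))) (res ++ [c]) (some k)
        = res ++ pvGo ls c) ∧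
    (∀ (k : Int) (res : List Int) (prev : Option Int),
      (∀ j, prev = some j → j < k - 1) →
      pvLoopB (pvIdxB (PySem.List.enumerate ls k)) res prev = res ++ pvGo ls 0) := by
  induction ls with
  | nil =>
      constructor
      · intro k res c hc
        have hc0 : c ≠ 0 := by omega
        simp [PySem.List.enumerate_nil, pvIdxB, pvLoopB, pvGo, hc0]
      · intro k res prev _
        simp [PySem.List.enumerate_nil, pvIdxB, pvLoopB, pvGo]
  | cons l ls ih =>
      obtain ⟨ih1, ih2⟩ := ih
      constructor
      · intro k res c hc
        rw [PySem.List.enumerate_cons]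
        by_cases h : PySem.Str.strip l ≠ ""
        · simp only [pvIdxB]
          rw [if_pos h]
          simp only [pvLoopB]
          rw [if_pos (show (some k : Option Int) = some (k + 1 - 1) by norm_num)]
          rw [pvBump_append]
          rw [ih1 (k + 1) res (c + 1) (by omega)]
          simp [pvGo, h]
        · have he : PySem.Str.strip l = "" := not_not.mp h
          simp only [pvIdxB]
          rw [if_neg h]
          rw [ih2 (k + 1 + 1) (res ++ [c]) (some k) (by intro j hj; injection hj; omega)]
          have hc0 : c ≠ 0 := by omega
          simp [pvGo, he, hc0]
      · intro k res prev hprev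
        rw [PySem.List.enumerate_cons]
        by_cases h : PySem.Str.strip l ≠ ""
        · simp only [pvIdxB]
          rw [if_pos h]
          simp only [pvLoopB]
          have hne : prev ≠ some (k - 1) := by
            intro hp; have := hprev _ hp; omega
          rw [if_neg hne]
          rw [ih1 k res 1 (by omega)]
          simp [pvGo, h]
        · have he : PySem.Str.strip l = "" := not_not.mp h
          simp only [pvIdxB]
          rw [if_neg h]
          rw [ih2 (k + 1) res prev (by intro j hj; have := hprev j hj; omega)]
          simp [pvGo, he]

-- ===== VERDICT (by name: the statement is the Claim_ definition above) =====
theorem dolzine_kitic_spec : Claim_equal_dolzine_kitic := by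
  intro pesem _
  unfold Spec_dolzine_kitic
  simp only [dolzine_kitic, dolzine_kitic_alt]
  have hA := pvA_inv ((PySem.Str.split? pesem "\n").getD []) [] []
  have hB := (pvB_inv ((PySem.Str.split? pesem "\n").getD [])).2 0 [] none
    (by intro j hj; simp at hj)
  simp only [List.map_nil, List.nil_append, List.length_nil, Int.natCast_zero] at hA hB
  rw [hA, hB]
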